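-- pv_equiv track=rewrite | github.com/C4T-BuT-S4D/innoctf-final-10-05-2020 | checkers/qrantine/qr_lib.py | create_code
-- ===== SOURCE A (Python) =====
-- def create_code(home, work):
--     home = home[:32].zfill(32)
--     work = work[:32].zfill(32)
--
--     con = home + work
--
--     seed = []
--     for i in con:
--         seed += list(bin(ord(i) ^ 0x3c)[2:].zfill(8))
--
--     for i in range(0, 4):
--         res = 0
--         for j in range(i, len(con), 4):
--             res ^= ord(con[j])
--         seed += list(bin(res)[2:].zfill(8))
--
--     return list(map(int, seed))
-- ===== SOURCE B (Python) =====
-- def create_code(home, work):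
--     # Single pass over the concatenated string: emit the XOR-encoded bits of each
--     # character and fold its ordinal into the accumulator of its index class mod 4,
--     # instead of re-scanning the string four more times.
--     con = home[:32].zfill(32) + work[:32].zfill(32)
--     seed = []
--     acc = [0, 0, 0, 0]
--     for idx, ch in enumerate(con):
--         o = ord(ch)
--         seed += list(format(o ^ 0x3c, 'b').zfill(8))
--         acc[idx % 4] ^= o
--     for r in acc:
--         seed += list(format(r, 'b').zfill(8))
--     return [int(b) for b in seed]
-- ===== Notes on version B (the rewrite author's own statement) =====
-- stated objective: alternative
-- what changed: B replaces A's five scans of the 64-char string (one for the bit emission plus four strided re-scans computing the XOR checksums) with a single enumerate pass that emits the bits and folds each ordinal into a length-4 accumulator keyed by index mod 4; input size is capped at 64 chars, so the gain is a constant factor, not asymptotic.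
import Mathlib
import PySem

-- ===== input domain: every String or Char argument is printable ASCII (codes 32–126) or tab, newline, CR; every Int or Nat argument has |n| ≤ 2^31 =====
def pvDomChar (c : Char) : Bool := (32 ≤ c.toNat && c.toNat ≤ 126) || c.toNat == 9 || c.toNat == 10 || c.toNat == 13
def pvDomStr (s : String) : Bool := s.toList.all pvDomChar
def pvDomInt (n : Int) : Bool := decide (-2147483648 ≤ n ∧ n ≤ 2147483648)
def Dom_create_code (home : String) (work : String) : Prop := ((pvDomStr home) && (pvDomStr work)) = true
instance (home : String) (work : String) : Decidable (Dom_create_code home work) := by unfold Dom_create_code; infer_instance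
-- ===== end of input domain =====

-- B makes one pass over the concatenated string (emitting bits and folding the four
-- mod-4 XOR accumulators simultaneously) instead of A's bit pass plus four strided re-scans.


-- ===== PORT A =====
-- ord(c): a Char's code point
def pvOrd (c : Char) : Int := (c.toNat : Int)
-- bin(x)[2:].zfill(8): bin(x) is PySem.Int.toBinChars0b, [2:] is slice from 2 (exact)
def pvBitsA (x : Int) : List Char :=
  PySem.Chars.zfill (PySem.List.slice (PySem.Int.toBinChars0b x) (some 2) none) 8
-- int(b) for one seed character (always '0' or '1' here, so the getD default is never used)
def pvToInt (c : Char) : Int := (PySem.Int.ofChars? [c]).getD 0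

def create_code (home : String) (work : String) : List Int :=
  let h := PySem.Chars.zfill (PySem.List.slice home.toList none (some 32)) 32
  let w := PySem.Chars.zfill (PySem.List.slice work.toList none (some 32)) 32
  let con := h ++ w
  let seed := con.foldl (fun s c => s ++ pvBitsA (PySem.Int.bxor (pvOrd c) 0x3c)) ([] : List Char)
  let seed := (PySem.List.pyRange 0 4 1).foldl (fun s i =>
      let res := (PySem.List.pyRange i ((con.length : Int)) 4).foldl
        (fun r j => PySem.Int.bxor r (pvOrd (PySem.List.pyGetD con j ' '))) 0
      s ++ pvBitsA res) seed
  seed.map pvToInt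

-- ===== PORT B =====
-- format(x, 'b').zfill(8)
def pvBitsB (x : Int) : List Char := PySem.Chars.zfill (PySem.Int.toBinChars x) 8
-- the body of B's single enumerate loop: append the bits, fold the ordinal into acc[idx % 4]
def pvStepB (st : List Char × List Int) (p : Int × Char) : List Char × List Int :=
  let o := pvOrd p.2
  let k := (PySem.Int.mod p.1 4).toNat
  (st.1 ++ pvBitsB (PySem.Int.bxor o 0x3c), st.2.set k (PySem.Int.bxor (st.2.getD k 0) o))

def create_code_alt (home : String) (work : String) : List Int :=
  let con := PySem.Chars.zfill (PySem.List.slice home.toList none (some 32)) 32 ++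
             PySem.Chars.zfill (PySem.List.slice work.toList none (some 32)) 32
  let st := (PySem.List.enumerate con 0).foldl pvStepB (([] : List Char), [0, 0, 0, 0])
  let seed := st.2.foldl (fun s r => s ++ pvBitsB r) st.1
  seed.map pvToInt

-- ===== PRECONDITION & SPEC =====
def Spec_create_code (home : String) (work : String) (out : List Int) : Prop := out = create_code_alt home work
instance (home : String) (work : String) (out : List Int) : Decidable (Spec_create_code home work out) := by unfold Spec_create_code; infer_instance

-- ===== CLAIM (what is proved, stated in full; the proofs are below) =====
def Claim_equal_create_code : Prop := ∀ (home : String) (work : String), Dom_create_code home work → Spec_create_code home work (create_code home work)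

-- ===== LEMMAS AND PROOFS =====

-- the ordinals of the characters of cs sitting (from global offset m) at indices ≡ i (mod 4)
def pvSel : List Char → Nat → Nat → List Int
  | [], _, _ => []
  | c :: cs, m, i => (if m % 4 = i then [pvOrd c] else []) ++ pvSel cs (m + 1) i

lemma pvOrd_nonneg (c : Char) : 0 ≤ pvOrd c := by
  simp [pvOrd]

lemma bits_eq (x : Int) (hx : 0 ≤ x) : pvBitsA x = pvBitsB x := by
  unfold pvBitsA pvBitsB PySem.Int.toBinChars0b PySem.Int.toBinChars
  rw [PySem.List.slice_from _ (by norm_num)]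
  rw [if_neg (by omega), if_neg (by omega)]
  rfl

lemma bxor_nonneg (a b : Int) (ha : 0 ≤ a) (hb : 0 ≤ b) : 0 ≤ PySem.Int.bxor a b := by
  rw [PySem.Int.bxor_of_nonneg ha hb]; positivity

lemma foldl_bxor_nonneg (l : List Int) (r : Int) (hr : 0 ≤ r) (h : ∀ x ∈ l, 0 ≤ x) :
    0 ≤ l.foldl PySem.Int.bxor r := by
  induction l generalizing r with
  | nil => simpa using hr
  | cons x xs ih =>
    simp only [List.foldl_cons]
    exact ih _ (bxor_nonneg _ _ hr (h x (by simp))) (fun y hy => h y (by simp [hy]))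

lemma pvSel_nonneg (cs : List Char) (m i : Nat) : ∀ x ∈ pvSel cs m i, 0 ≤ x := by
  induction cs generalizing m with
  | nil => simp [pvSel]
  | cons c cs ih =>
    intro x hx
    simp only [pvSel, List.mem_append] at hx
    rcases hx with hx | hx
    · split at hx <;> simp_all [pvOrd_nonneg]
    · exact ih (m + 1) x hx

lemma pvSel_append (xs ys : List Char) (m i : Nat) :
    pvSel (xs ++ ys) m i = pvSel xs m i ++ pvSel ys (m + xs.length) i := by
  induction xs generalizing m with
  | nil => simp [pvSel]
  | cons c cs ih => simp [pvSel, ih (m + 1), List.append_assoc, Nat.add_assoc, Nat.add_comm 1]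

-- extending the stop of range(i, L, 4) by one
lemma pyRange4_succ (i L : Nat) (hi : i < 4) :
    PySem.List.pyRange (i : Int) ((L : Int) + 1) 4
      = PySem.List.pyRange (i : Int) (L : Int) 4 ++ (if L % 4 = i then [(L : Int)] else []) := by
  rw [PySem.List.pyRange_of_pos _ _ (by norm_num), PySem.List.pyRange_of_pos _ _ (by norm_num)]
  by_cases hle : i ≤ L
  · rw [if_pos (by exact_mod_cast by omega)]
    by_cases hmod : L % 4 = i
    · rw [if_pos hmod]
      have h1 : (((L : Int) + 1 - (i : Int) + 4 - 1) / 4).toNat = (L - i) / 4 + 1 := by omega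
      have h0 : (if (i : Int) < (L : Int) then (((L : Int) - (i : Int) + 4 - 1) / 4).toNat else 0)
          = (L - i) / 4 := by split <;> omega
      rw [h1, h0, List.range_succ, List.map_append]
      congr 1
      simp only [List.map_cons, List.map_nil]
      congr 1
      omega
    · rw [if_neg hmod]
      have h1 : (((L : Int) + 1 - (i : Int) + 4 - 1) / 4).toNat = (L + 3 - i) / 4 := by omega
      have h0 : (if (i : Int) < (L : Int) then (((L : Int) - (i : Int) + 4 - 1) / 4).toNat else 0)
          = (L + 3 - i) / 4 := by split <;> omega
      rw [h1, h0, List.append_nil]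
  · have hmod : ¬ (L % 4 = i) := by omega
    rw [if_neg hmod, if_neg (by exact_mod_cast by omega), if_neg (by exact_mod_cast by omega)]
    simp

-- the indices A's inner loop visits pick out exactly the pvSel elements
lemma map_pyRange_sel (con : List Char) (i : Nat) (hi : i < 4) :
    (PySem.List.pyRange (i : Int) ((con.length : Int)) 4).map
        (fun j => pvOrd (PySem.List.pyGetD con j ' '))
      = pvSel con 0 i := by
  induction con using List.reverseRecOn with
  | nil =>
    rw [PySem.List.pyRange_of_pos _ _ (by norm_num)]
    simp [pvSel]
  | append_singleton xs c ih =>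
    have hlen : ((xs ++ [c]).length : Int) = (xs.length : Int) + 1 := by simp
    rw [hlen, pyRange4_succ i xs.length hi, List.map_append]
    have hmapeq : (PySem.List.pyRange (i : Int) ((xs.length : Int)) 4).map
        (fun j => pvOrd (PySem.List.pyGetD (xs ++ [c]) j ' '))
      = (PySem.List.pyRange (i : Int) ((xs.length : Int)) 4).map
        (fun j => pvOrd (PySem.List.pyGetD xs j ' ')) := by
      apply List.map_congr_left
      intro j hj
      rw [PySem.List.mem_pyRange_iff_of_pos (by norm_num)] at hj
      obtain ⟨h1, h2, -⟩ := hj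
      have h0 : 0 ≤ j := le_trans (by positivity) h1
      rw [PySem.List.pyGetD_eq_getElem _ _ h0 (by simp; omega),
          PySem.List.pyGetD_eq_getElem _ _ h0 (by omega)]
      congr 1
      exact List.getElem_append_left (by omega)
    rw [hmapeq, ih, pvSel_append]
    congr 1
    by_cases hmod : xs.length % 4 = i
    · rw [if_pos hmod]
      simp only [List.map_cons, List.map_nil]
      rw [PySem.List.pyGetD_eq_getElem _ _ (by positivity) (by simp)]
      simp [pvSel, hmod]
    · simp [pvSel, hmod]

lemma A_inner (con : List Char) (i : Nat) (hi : i < 4) :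
    (PySem.List.pyRange (i : Int) ((con.length : Int)) 4).foldl
        (fun r j => PySem.Int.bxor r (pvOrd (PySem.List.pyGetD con j ' '))) 0
      = (pvSel con 0 i).foldl PySem.Int.bxor 0 := by
  rw [← map_pyRange_sel con i hi, List.foldl_map]

-- B's single pass computes the flat bit list and the four class XORs at once
lemma B_fold (con : List Char) : ∀ (m : Nat) (s : List Char) (a0 a1 a2 a3 : Int),
    (PySem.List.enumerate con (m : Int)).foldl pvStepB (s, [a0, a1, a2, a3])
      = (s ++ con.flatMap (fun c => pvBitsB (PySem.Int.bxor (pvOrd c) 60)),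
         [(pvSel con m 0).foldl PySem.Int.bxor a0, (pvSel con m 1).foldl PySem.Int.bxor a1,
          (pvSel con m 2).foldl PySem.Int.bxor a2, (pvSel con m 3).foldl PySem.Int.bxor a3]) := by
  induction con with
  | nil => intro m s a0 a1 a2 a3; simp [pvSel, PySem.List.enumerate]
  | cons c cs ih =>
    intro m s a0 a1 a2 a3
    rw [PySem.List.enumerate_cons]
    have hcast : (m : Int) + 1 = ((m + 1 : Nat) : Int) := by push_cast; ring
    have hk : (PySem.Int.mod (m : Int) 4).toNat = m % 4 := by
      rw [show ((4 : Int) = ((4 : Nat) : Int)) from rfl, PySem.Int.mod_natCast]; omega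
    simp only [List.foldl_cons, pvStepB, hk, hcast]
    have h4 : m % 4 < 4 := Nat.mod_lt _ (by norm_num)
    have hsel : ∀ i, pvSel (c :: cs) m i
        = (if m % 4 = i then [pvOrd c] else []) ++ pvSel cs (m + 1) i := fun i => rfl
    interval_cases h : m % 4 <;>
      simp only [List.set, List.getD, List.getElem?_cons_zero, List.getElem?_cons_succ,
        Option.getD_some] <;>
      rw [ih (m + 1)] <;>
      simp [hsel, List.flatMap_cons, List.append_assoc]

-- the two seed computations agree for an arbitrary concatenated character list
lemma seeds_eq (con : List Char) :
    (PySem.List.pyRange 0 4 1).foldl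
        (fun s i => s ++ pvBitsA ((PySem.List.pyRange i ((con.length : Int)) 4).foldl
            (fun r j => PySem.Int.bxor r (pvOrd (PySem.List.pyGetD con j ' '))) 0))
        (con.foldl (fun s c => s ++ pvBitsA (PySem.Int.bxor (pvOrd c) 0x3c)) ([] : List Char))
      = ((PySem.List.enumerate con 0).foldl pvStepB (([] : List Char), [0, 0, 0, 0])).2.foldl
          (fun s r => s ++ pvBitsB r)
          ((PySem.List.enumerate con 0).foldl pvStepB (([] : List Char), [0, 0, 0, 0])).1 := by
  have hB := B_fold con 0 [] 0 0 0 0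
  norm_num at hB
  rw [hB]
  have A0 := A_inner con 0 (by norm_num)
  have A1 := A_inner con 1 (by norm_num)
  have A2 := A_inner con 2 (by norm_num)
  have A3 := A_inner con 3 (by norm_num)
  norm_num at A0 A1 A2 A3
  rw [show PySem.List.pyRange 0 4 1 = [0, 1, 2, 3] from by decide]
  simp only [List.foldl_cons, List.foldl_nil]
  rw [A0, A1, A2, A3, PySem.List.foldl_append_eq_flatMap]
  have hfun : (fun c => pvBitsA (PySem.Int.bxor (pvOrd c) 0x3c))
      = (fun c => pvBitsB (PySem.Int.bxor (pvOrd c) 60)) :=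
    funext fun c => bits_eq _ (bxor_nonneg _ _ (pvOrd_nonneg c) (by norm_num))
  have hres : ∀ i : Nat, pvBitsA ((pvSel con 0 i).foldl PySem.Int.bxor 0)
      = pvBitsB ((pvSel con 0 i).foldl PySem.Int.bxor 0) :=
    fun i => bits_eq _ (foldl_bxor_nonneg _ _ le_rfl (pvSel_nonneg con 0 i))
  rw [hfun, hres 0, hres 1, hres 2, hres 3]
  simp [List.append_assoc]

-- ===== VERDICT (by name: the statement is the Claim_ definition above) =====
theorem create_code_spec : Claim_equal_create_code := by
  intro home work _
  unfold Spec_create_code create_code create_code_alt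
  exact congrArg (List.map pvToInt) (seeds_eq _)
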